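-- pv_equiv track=rewrite | github.com/ypicx/ChipWhisper | stm32_agent/graph/repair.py | _find_hunk_start
-- ===== SOURCE A (Python) =====
-- from typing import Any, Callable, Dict, List, Sequence
--
-- def _find_hunk_start(
--     lines: List[str],
--     source_lines: List[str],
--     suggested_start: int,
--     minimum_start: int,
-- ) -> int | None:
--     bounded_start = max(minimum_start, suggested_start)
--     if not source_lines:
--         return bounded_start if bounded_start <= len(lines) else None
--     if bounded_start >= 0 and lines[bounded_start : bounded_start + len(source_lines)] == source_lines:
--         return bounded_start
--
--     candidates: List[int] = []
--     max_start = len(lines) - len(source_lines)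
--     for index in range(max(minimum_start, 0), max_start + 1):
--         if lines[index : index + len(source_lines)] == source_lines:
--             candidates.append(index)
--             if len(candidates) > 1:
--                 return None
--     return candidates[0] if len(candidates) == 1 else None
-- ===== SOURCE B (Python) =====
-- def _find_hunk_start(lines, source_lines, suggested_start, minimum_start):
--     bounded_start = max(minimum_start, suggested_start)
--     n, m = len(lines), len(source_lines)
--     if m == 0:
--         return bounded_start if bounded_start <= n else None
--     # inverted index: line text -> all positions where it occurs (built once)
--     index = {}
--     for pos, line in enumerate(lines):
--         index.setdefault(line, []).append(pos)
--     # candidate starts = intersection of the shifted posting lists of the pattern lines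
--     cand = set(range(max(minimum_start, 0), n - m + 1))
--     for j, s in enumerate(source_lines):
--         cand &= {p - j for p in index.get(s, [])}
--         if not cand:
--             break
--     if bounded_start in cand:
--         return bounded_start
--     if len(cand) == 1:
--         return cand.pop()
--     return None
-- ===== Notes on version B (the rewrite author's own statement) =====
-- stated objective: alternative
-- what changed: A slides a window over the text and compares each window with the pattern (with a stateful early-return candidate scan); B never compares windows at all: it builds an inverted index from line text to its positions in one pass and computes the match positions as the intersection of the shifted posting sets of the pattern lines (stopping once the intersection is empty), then decides by membership of the bounded start and the size of the intersection.
import Mathlib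
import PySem

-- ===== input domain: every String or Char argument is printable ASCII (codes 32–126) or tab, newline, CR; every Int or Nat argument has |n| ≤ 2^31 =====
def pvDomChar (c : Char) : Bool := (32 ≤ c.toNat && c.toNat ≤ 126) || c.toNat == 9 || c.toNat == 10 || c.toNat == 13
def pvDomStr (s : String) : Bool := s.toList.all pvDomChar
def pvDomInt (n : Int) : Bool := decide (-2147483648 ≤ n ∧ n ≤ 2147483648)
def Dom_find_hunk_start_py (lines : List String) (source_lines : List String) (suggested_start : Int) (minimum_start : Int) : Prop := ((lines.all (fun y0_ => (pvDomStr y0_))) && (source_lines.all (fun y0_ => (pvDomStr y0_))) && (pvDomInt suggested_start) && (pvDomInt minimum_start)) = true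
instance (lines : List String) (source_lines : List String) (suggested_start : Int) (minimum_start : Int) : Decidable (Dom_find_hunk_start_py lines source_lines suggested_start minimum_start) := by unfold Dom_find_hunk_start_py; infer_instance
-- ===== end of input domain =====

-- B replaces A's sliding-window comparison by an inverted-index search: one pass builds a dict from
-- line text to its positions, the match positions are the intersection of the shifted posting sets of
-- the pattern lines, and the answer is read off that set (objective: alternative algorithm, same cost).


-- ===== PORT A =====
-- A's scan loop: for index in range(...): if slice match: append to candidates; early None at 2
def find_hunk_start_loop (lines source : List String) : List Int → List Int → Option Int
  | [], cand => if cand.length = 1 then PySem.List.pyGet? cand 0 else none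
  | i :: rest, cand =>
    if PySem.List.slice lines (some i) (some (i + (source.length : Int))) = source then
      let cand' := cand ++ [i]
      if cand'.length > 1 then none
      else find_hunk_start_loop lines source rest cand'
    else find_hunk_start_loop lines source rest cand

def find_hunk_start_py (lines : List String) (source_lines : List String) (suggested_start : Int) (minimum_start : Int) : Option Int :=
  let bounded_start := max minimum_start suggested_start
  if source_lines = [] then
    (if bounded_start ≤ (lines.length : Int) then some bounded_start else none)
  else if 0 ≤ bounded_start ∧
      PySem.List.slice lines (some bounded_start) (some (bounded_start + (source_lines.length : Int))) = source_lines then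
    some bounded_start
  else
    find_hunk_start_loop lines source_lines
      (PySem.List.pyRange (max minimum_start 0) ((lines.length : Int) - (source_lines.length : Int) + 1) 1) []

-- ===== PORT B =====
-- B's index-building loop: for pos, line in enumerate(lines): index.setdefault(line, []).append(pos)
def find_hunk_start_index (lines : List String) : PySem.Dict String (List Int) :=
  (PySem.List.enumerate lines 0).foldl
    (fun d p => PySem.Dict.modify d p.2 [] (fun l => l ++ [p.1])) PySem.Dict.empty

-- B's intersection loop: for j, s in enumerate(source_lines): cand &= {p - j for p in index.get(s, [])}; if not cand: break
def find_hunk_start_inter (index : PySem.Dict String (List Int)) : List (Int × String) → PySem.Set Int → PySem.Set Int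
  | [], c => c
  | p :: rest, c =>
    let c' := PySem.Set.inter c (PySem.Set.ofList ((index.getD p.2 []).map (fun q => q - p.1)))
    if c' = [] then c' else find_hunk_start_inter index rest c'

def find_hunk_start_py_alt (lines : List String) (source_lines : List String) (suggested_start : Int) (minimum_start : Int) : Option Int :=
  let bounded_start := max minimum_start suggested_start
  let n : Int := lines.length
  let m : Int := source_lines.length
  if m = 0 then
    (if bounded_start ≤ n then some bounded_start else none)
  else
    let index := find_hunk_start_index lines
    -- cand = set(range(max(minimum_start, 0), n - m + 1)); for j, s: cand &= {p - j for p in index.get(s, [])}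
    let cand : PySem.Set Int := find_hunk_start_inter index (PySem.List.enumerate source_lines 0)
      (PySem.Set.ofList (PySem.List.pyRange (max minimum_start 0) (n - m + 1) 1))
    if bounded_start ∈ cand then some bounded_start
    else if cand.length = 1 then PySem.List.pyGet? cand 0   -- cand.pop() of a singleton
    else none

-- ===== PRECONDITION & SPEC =====
def Spec_find_hunk_start_py (lines : List String) (source_lines : List String) (suggested_start : Int) (minimum_start : Int) (out : Option Int) : Prop := out = find_hunk_start_py_alt lines source_lines suggested_start minimum_start
instance (lines : List String) (source_lines : List String) (suggested_start : Int) (minimum_start : Int) (out : Option Int) : Decidable (Spec_find_hunk_start_py lines source_lines suggested_start minimum_start out) := by unfold Spec_find_hunk_start_py; infer_instance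

-- ===== CLAIM (what is proved, stated in full; the proofs are below) =====
def Claim_equal_find_hunk_start_py : Prop := ∀ (lines : List String) (source_lines : List String) (suggested_start : Int) (minimum_start : Int), Dom_find_hunk_start_py lines source_lines suggested_start minimum_start → Spec_find_hunk_start_py lines source_lines suggested_start minimum_start (find_hunk_start_py lines source_lines suggested_start minimum_start)

-- ===== LEMMAS AND PROOFS =====

-- A's per-window test, as the Bool A's loop branches on
def find_hunk_start_pA (lines source : List String) (i : Int) : Bool :=
  decide (PySem.List.slice lines (some i) (some (i + (source.length : Int))) = source)

-- B's semantic window test (what the posting-set intersection computes, shown below)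
def find_hunk_start_win (lines source : List String) (i : Int) : Bool :=
  (PySem.List.pyRange 0 (source.length : Int) 1).all
    (fun j => PySem.List.pyGet? lines (i + j) == PySem.List.pyGet? source j)

-- window equality, element by element (list level)
theorem take_drop_eq_iff {α : Type} (l src : List α) (k : Nat) :
    ((l.drop k).take src.length = src) ↔ ∀ j < src.length, l[k + j]? = src[j]? := by
  constructor
  · intro h j hj
    have : ((l.drop k).take src.length)[j]? = src[j]? := by rw [h]
    simpa [List.getElem?_take, hj, List.getElem?_drop] using this
  · intro h
    apply List.ext_getElem?
    intro j
    by_cases hj : j < src.length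
    · simpa [List.getElem?_take, hj, List.getElem?_drop] using h j hj
    · rw [List.getElem?_eq_none (by simp; omega), eq_comm, List.getElem?_eq_none (by omega)]

theorem pyGet?_of_nonneg' {α : Type} (xs : List α) (t : Int) (ht : 0 ≤ t) :
    PySem.List.pyGet? xs t = xs[t.toNat]? := by
  simp only [PySem.List.pyGet?, PySem.List.pyIdx?, ht, if_pos]
  split
  · simp
  · rw [eq_comm, Option.bind_eq_none_iff.mpr (by simp), eq_comm, List.getElem?_eq_none (by omega)]

-- A's slice test agrees with the semantic window test, for any nonnegative start
theorem win_iff (lines source : List String) (i : Int) (hi : 0 ≤ i) :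
    find_hunk_start_pA lines source i = find_hunk_start_win lines source i := by
  rw [Bool.eq_iff_iff]
  rw [show i = ((i.toNat : Nat) : Int) from (Int.toNat_of_nonneg hi).symm]
  simp only [find_hunk_start_pA, find_hunk_start_win, decide_eq_true_iff, List.all_eq_true,
    PySem.List.mem_pyRange_one]
  rw [PySem.List.slice_natCast_add, take_drop_eq_iff]
  constructor
  · intro h j hj
    rw [pyGet?_of_nonneg' _ _ (by omega), pyGet?_of_nonneg' _ _ (by omega), beq_iff_eq,
      show ((i.toNat : Int) + j).toNat = i.toNat + j.toNat by omega]
    exact h j.toNat (by omega)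
  · intro h j hj
    have := h (j : Int) ⟨by omega, by omega⟩
    rw [pyGet?_of_nonneg' _ _ (by omega), pyGet?_of_nonneg' _ _ (by omega), beq_iff_eq] at this
    rw [show ((i.toNat : Int) + (j : Int)).toNat = i.toNat + j by omega] at this
    exact this

-- a matching nonempty window fits inside the list
theorem win_le (lines source : List String) (i : Int) (hs : source ≠ []) (hi : 0 ≤ i)
    (hw : find_hunk_start_win lines source i = true) :
    i + (source.length : Int) ≤ (lines.length : Int) := by
  have hpa : find_hunk_start_pA lines source i = true := by rw [win_iff lines source i hi]; exact hw
  rw [find_hunk_start_pA, decide_eq_true_iff,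
    show i = ((i.toNat : Nat) : Int) from (Int.toNat_of_nonneg hi).symm,
    PySem.List.slice_natCast_add] at hpa
  have hlen := congrArg List.length hpa
  simp only [List.length_take, List.length_drop] at hlen
  have hm : 0 < source.length := List.length_pos_of_ne_nil hs
  omega

theorem loop_single (lines source : List String) :
    ∀ (R : List Int) (c : Int),
      find_hunk_start_loop lines source R [c] =
        if R.filter (find_hunk_start_pA lines source) = [] then some c else none := by
  intro R
  induction R with
  | nil => intro c; simp [find_hunk_start_loop, PySem.List.pyGet?, PySem.List.pyIdx?]
  | cons i rest ih =>
    intro c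
    simp only [find_hunk_start_loop, List.filter_cons, find_hunk_start_pA]
    by_cases h : PySem.List.slice lines (some i) (some (i + (source.length : Int))) = source
    · simp [h]
    · simp [h, ih c]

theorem loop_nil (lines source : List String) :
    ∀ (R : List Int),
      find_hunk_start_loop lines source R [] =
        (match R.filter (find_hunk_start_pA lines source) with
          | [x] => some x
          | _ => none) := by
  intro R
  induction R with
  | nil => simp [find_hunk_start_loop]
  | cons i rest ih =>
    simp only [find_hunk_start_loop, List.filter_cons, find_hunk_start_pA]
    by_cases h : PySem.List.slice lines (some i) (some (i + (source.length : Int))) = source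
    · simp only [h, decide_true, if_pos, List.nil_append, List.length_cons, List.length_nil]
      rw [if_neg (by omega), loop_single lines source rest i]
      by_cases hf : rest.filter (find_hunk_start_pA lines source) = []
      · simp [hf]
      · simp only [hf]
        cases hrest : rest.filter (find_hunk_start_pA lines source) with
        | nil => exact absurd hrest hf
        | cons a t => simp
    · simp [h, ih]

-- the inverted index's posting list for s is exactly the enumerate-filter of lines by s
theorem index_foldl_getD (s : String) :
    ∀ (ps : List (Int × String)) (d : PySem.Dict String (List Int)),
      (ps.foldl (fun d p => PySem.Dict.modify d p.2 [] (fun l => l ++ [p.1])) d).getD s []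
        = d.getD s [] ++ (ps.filter (fun p => p.2 == s)).map (·.1) := by
  intro ps
  induction ps with
  | nil => simp
  | cons p rest ih =>
    intro d
    simp only [List.foldl_cons, ih, List.filter_cons]
    by_cases h : p.2 = s
    · subst h
      simp [PySem.Dict.getD_modify_self]
    · rw [PySem.Dict.getD_modify_of_ne _ _ _ (Ne.symm h)]
      simp [h]

theorem index_getD (lines : List String) (s : String) :
    (find_hunk_start_index lines).getD s []
      = ((PySem.List.enumerate lines 0).filter (fun p => p.2 == s)).map (·.1) := by
  rw [find_hunk_start_index, index_foldl_getD]
  simp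

-- a fold of set intersections is a filter by the conjunction of the memberships
theorem foldl_inter_eq_filter {α β : Type} [BEq α] [LawfulBEq α] (g : β → PySem.Set α) :
    ∀ (ps : List β) (c : PySem.Set α),
      ps.foldl (fun c p => PySem.Set.inter c (g p)) c
        = c.filter (fun i => ps.all (fun p => (g p).contains i)) := by
  intro ps
  induction ps with
  | nil => simp
  | cons p rest ih =>
    intro c
    rw [List.foldl_cons, ih]
    simp only [PySem.Set.inter, List.filter_filter, List.all_cons]
    apply List.filter_congr
    intro i _
    rw [Bool.and_comm]

-- membership of i in the shifted posting set of (j, s) says lines[i+j] = s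
theorem mem_posting_iff (lines : List String) (s : String) (i j : Int) :
    (i ∈ ((find_hunk_start_index lines).getD s []).map (fun q => q - j)) ↔
      (∃ k : Nat, k < lines.length ∧ lines[k]? = some s ∧ (k : Int) = i + j) := by
  rw [index_getD, List.map_map]
  simp only [List.mem_map, List.mem_filter, Function.comp]
  constructor
  · rintro ⟨p, ⟨hmem, hps⟩, hpi⟩
    obtain ⟨k, hk, rfl⟩ := (PySem.List.mem_enumerate_iff _ _ _).mp hmem
    refine ⟨k, hk, ?_, by simp at hpi ⊢; omega⟩
    rw [List.getElem?_eq_getElem hk]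
    simpa using (beq_iff_eq.mp hps)
  · rintro ⟨k, hk, hs, hkij⟩
    rw [List.getElem?_eq_getElem hk] at hs
    refine ⟨(0 + (k : Int), lines[k]), ⟨(PySem.List.mem_enumerate_iff _ _ _).mpr ⟨k, hk, rfl⟩, ?_⟩, by simp; omega⟩
    simpa using (Option.some_inj.mp hs)

-- on candidates from the admissible range, the posting-set intersection test IS the window test
theorem inter_test_eq_win (lines source : List String) (i : Int)
    (hi0 : 0 ≤ i) (hin : i + (source.length : Int) ≤ (lines.length : Int)) :
    ((PySem.List.enumerate source 0).all
        (fun p => (PySem.Set.ofList (((find_hunk_start_index lines).getD p.2 []).map (fun q => q - p.1))).contains i))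
      = find_hunk_start_win lines source i := by
  rw [Bool.eq_iff_iff]
  simp only [List.all_eq_true, find_hunk_start_win, PySem.List.mem_pyRange_one]
  constructor
  · rintro h j ⟨hj0, hjm⟩
    have hjn : j.toNat < source.length := by omega
    have := h (0 + (j.toNat : Int), source[j.toNat]) ((PySem.List.mem_enumerate_iff _ _ _).mpr ⟨j.toNat, hjn, rfl⟩)
    rw [PySem.Set.contains_iff, PySem.Set.mem_ofList, mem_posting_iff] at this
    obtain ⟨k, hk, hks, hkij⟩ := this
    rw [pyGet?_of_nonneg' _ _ (by omega), pyGet?_of_nonneg' _ _ hj0, beq_iff_eq,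
      show (i + j).toNat = k by omega, hks, List.getElem?_eq_getElem hjn]
  · rintro h p hp
    obtain ⟨k, hk, rfl⟩ := (PySem.List.mem_enumerate_iff _ _ _).mp hp
    rw [PySem.Set.contains_iff, PySem.Set.mem_ofList, mem_posting_iff]
    have := h (k : Int) ⟨by omega, by omega⟩
    rw [pyGet?_of_nonneg' _ _ (by omega), pyGet?_of_nonneg' _ _ (by omega), beq_iff_eq,
      show ((k : Int)).toNat = k by omega, List.getElem?_eq_getElem hk] at this
    exact ⟨(i + (k : Int)).toNat, by omega, by rw [show ((i + (k:Int))).toNat = (i + k).toNat from rfl]; simpa using this, by push_cast; omega⟩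

-- the early 'break' on an empty candidate set does not change the result: inter [] t = []
theorem inter_eq_foldl (index : PySem.Dict String (List Int)) :
    ∀ (ps : List (Int × String)) (c : PySem.Set Int),
      find_hunk_start_inter index ps c
        = ps.foldl (fun c p => PySem.Set.inter c (PySem.Set.ofList ((index.getD p.2 []).map (fun q => q - p.1)))) c := by
  intro ps
  induction ps with
  | nil => intro c; rfl
  | cons p rest ih =>
    intro c
    rw [find_hunk_start_inter, List.foldl_cons]
    by_cases h : PySem.Set.inter c (PySem.Set.ofList ((index.getD p.2 []).map (fun q => q - p.1))) = []
    · simp only [h, if_pos]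
      have : ∀ qs : List (Int × String),
          qs.foldl (fun c p => PySem.Set.inter c (PySem.Set.ofList ((index.getD p.2 []).map (fun q => q - p.1)))) ([] : PySem.Set Int) = [] := by
        intro qs
        induction qs with
        | nil => rfl
        | cons q t iht => rw [List.foldl_cons]; exact iht
      exact (this rest).symm
    · rw [if_neg h, ih]

-- B's candidate set is exactly the range filtered by the window test
theorem cand_eq (lines source : List String) (minS : Int) (hs : source ≠ []) :
    (find_hunk_start_inter (find_hunk_start_index lines) (PySem.List.enumerate source 0)
        (PySem.Set.ofList (PySem.List.pyRange (max minS 0) ((lines.length : Int) - (source.length : Int) + 1) 1)))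
      = (PySem.List.pyRange (max minS 0) ((lines.length : Int) - (source.length : Int) + 1) 1).filter
          (find_hunk_start_win lines source) := by
  rw [inter_eq_foldl, foldl_inter_eq_filter, PySem.Set.ofList_eq_self_of_nodup _ (PySem.List.nodup_pyRange_one _ _)]
  apply List.filter_congr
  intro i hi
  have hr := PySem.List.mem_pyRange_one.mp hi
  have hm : 0 < source.length := List.length_pos_of_ne_nil hs
  exact inter_test_eq_win lines source i (by omega) (by omega)

-- ===== VERDICT (by name: the statement is the Claim_ definition above) =====
theorem find_hunk_start_py_spec : Claim_equal_find_hunk_start_py := by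
  intro lines source sugg minS _dom
  unfold Spec_find_hunk_start_py
  by_cases hsrc : source = []
  · subst hsrc; simp [find_hunk_start_py, find_hunk_start_py_alt]
  · have hm : 0 < source.length := List.length_pos_of_ne_nil hsrc
    have hm0 : ¬ ((source.length : Int) = 0) := by omega
    simp only [find_hunk_start_py, find_hunk_start_py_alt]
    rw [if_neg hsrc, if_neg hm0, cand_eq lines source minS hsrc]
    by_cases hchk : 0 ≤ max minS sugg ∧
        PySem.List.slice lines (some (max minS sugg))
          (some (max minS sugg + (source.length : Int))) = source
    · rw [if_pos hchk]
      have hwin : find_hunk_start_win lines source (max minS sugg) = true := by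
        rw [← win_iff lines source _ hchk.1, find_hunk_start_pA, decide_eq_true_iff]
        exact hchk.2
      have hle := win_le lines source (max minS sugg) hsrc hchk.1 hwin
      have hmem : (max minS sugg) ∈ PySem.List.pyRange (max minS 0)
          ((lines.length : Int) - (source.length : Int) + 1) 1 :=
        PySem.List.mem_pyRange_one.mpr ⟨by omega, by omega⟩
      rw [if_pos (List.mem_filter.mpr ⟨hmem, hwin⟩)]
    · rw [if_neg hchk, loop_nil]
      have hfe : (PySem.List.pyRange (max minS 0)
            ((lines.length : Int) - (source.length : Int) + 1) 1).filter
            (find_hunk_start_pA lines source)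
          = (PySem.List.pyRange (max minS 0)
            ((lines.length : Int) - (source.length : Int) + 1) 1).filter
            (find_hunk_start_win lines source) := by
        apply List.filter_congr
        intro i hi
        exact win_iff lines source i (by
          have := PySem.List.mem_pyRange_one.mp hi
          omega)
      rw [hfe]
      have hnot : (max minS sugg) ∉ (PySem.List.pyRange (max minS 0)
          ((lines.length : Int) - (source.length : Int) + 1) 1).filter
          (find_hunk_start_win lines source) := by
        intro hmem
        rcases List.mem_filter.mp hmem with ⟨hr, hw⟩
        have h0 : (0 : Int) ≤ max minS sugg := by
          have := PySem.List.mem_pyRange_one.mp hr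
          omega
        apply hchk
        refine ⟨h0, ?_⟩
        have := win_iff lines source (max minS sugg) h0
        rw [find_hunk_start_pA] at this
        exact of_decide_eq_true (this.trans hw)
      rw [if_neg hnot]
      cases hocc : (PySem.List.pyRange (max minS 0)
          ((lines.length : Int) - (source.length : Int) + 1) 1).filter
          (find_hunk_start_win lines source) with
      | nil => simp
      | cons x t =>
        cases t with
        | nil => simp [PySem.List.pyGet?, PySem.List.pyIdx?]
        | cons y u => simp
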